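-- pv_equiv track=rewrite | github.com/Onako-Nxasana/python | pile_of_towels.py | sort_the_pile
-- ===== SOURCE A (Python) =====
-- def sort_the_pile(pile_of_towels, weekly_used_towels):
--   while weekly_used_towels:
--     if weekly_used_towels[0] == 0:
--       weekly_used_towels = weekly_used_towels[1:]
--     else:
--       pot = pile_of_towels[::-1]
--       basket = pot[:weekly_used_towels[0]]
--       basket.sort(reverse = True)
--       pile_of_towels = pile_of_towels[:-weekly_used_towels[0]]
--       pile_of_towels.extend(basket)
--       basket.clear()
--       weekly_used_towels = weekly_used_towels[1:]
--   return pile_of_towels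
-- ===== SOURCE B (Python) =====
-- def sort_the_pile(pile_of_towels, weekly_used_towels):
--     k = max(weekly_used_towels, default=0)
--     if k <= 0:
--         return pile_of_towels
--     cut = max(len(pile_of_towels) - k, 0)
--     return pile_of_towels[:cut] + sorted(pile_of_towels[cut:], reverse=True)
-- ===== Notes on version B (the rewrite author's own statement) =====
-- stated objective: faster
-- what changed: B drops A's per-week reverse/slice/sort loop and instead sorts the last max(weekly) elements descending once (each later smaller sort is a no-op on an already-descending suffix, each larger one subsumes the earlier ones).
-- outside the precondition, e.g. on sort_the_pile([1, 2, 3], [-1]): A returns [1, 3, 2], B returns [1, 2, 3]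
import Mathlib
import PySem

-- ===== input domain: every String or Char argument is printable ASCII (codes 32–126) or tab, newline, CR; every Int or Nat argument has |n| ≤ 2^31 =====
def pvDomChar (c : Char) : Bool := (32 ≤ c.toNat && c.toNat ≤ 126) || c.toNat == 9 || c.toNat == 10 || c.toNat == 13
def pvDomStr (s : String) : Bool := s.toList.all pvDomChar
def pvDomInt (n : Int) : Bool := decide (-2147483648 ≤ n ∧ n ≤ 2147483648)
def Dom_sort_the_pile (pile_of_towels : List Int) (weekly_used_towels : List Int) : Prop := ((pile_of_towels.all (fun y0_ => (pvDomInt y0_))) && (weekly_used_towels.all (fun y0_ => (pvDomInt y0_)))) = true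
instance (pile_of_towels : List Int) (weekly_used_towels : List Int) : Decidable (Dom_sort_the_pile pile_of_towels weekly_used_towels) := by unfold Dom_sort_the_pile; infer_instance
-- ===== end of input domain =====

-- B applies one descending sort to the last max(weekly) elements instead of A's per-week
-- reverse/slice/sort loop; return-value equivalence is proved (A reassigns its locals, so
-- neither caller argument is observably mutated on the admitted inputs).


-- ===== PORT A =====
-- literal port of A's while loop: recursion on weekly_used_towels; pile[::-1] is reverse
-- (PySem.List.slice?_none_none_neg_one), pot[:w] / pile[:-w] are PySem slices,
-- basket.sort(reverse=True) is PySem.List.sorted with reverse := true.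
def sort_the_pile (pile_of_towels : List Int) (weekly_used_towels : List Int) : List Int :=
  match weekly_used_towels with
  | [] => pile_of_towels
  | w :: rest =>
    if w = 0 then
      sort_the_pile pile_of_towels rest
    else
      let pot := pile_of_towels.reverse
      let basket := PySem.List.slice pot none (some w)
      let basket := PySem.List.sorted basket (fun x => x) true
      let pile' := PySem.List.slice pile_of_towels none (some (-w)) ++ basket
      sort_the_pile pile' rest

-- ===== PORT B =====
-- literal port of Source B: k = max(weekly, default=0); if k <= 0 return pile;
-- cut = max(len(pile) - k, 0); pile[:cut] + sorted(pile[cut:], reverse=True).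
def sort_the_pile_alt (pile_of_towels : List Int) (weekly_used_towels : List Int) : List Int :=
  let k := match PySem.List.max? weekly_used_towels (fun x => x) with
           | none => 0
           | some m => m
  if k ≤ 0 then pile_of_towels
  else
    let cut := max ((pile_of_towels.length : Int) - k) 0
    PySem.List.slice pile_of_towels none (some cut) ++
      PySem.List.sorted (PySem.List.slice pile_of_towels (some cut) none) (fun x => x) true

-- ===== PRECONDITION & SPEC =====
-- Pre_ excludes negative weekly entries: towel counts are naturally non-negative, and on
-- negative entries A's slice arithmetic produces an accidental truncation-like reshuffle
-- that no caller would specify (it still returns a value there; see the cite in the claim).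
def Pre_sort_the_pile (pile_of_towels : List Int) (weekly_used_towels : List Int) : Prop :=
  ∀ w ∈ weekly_used_towels, 0 ≤ w
instance (pile_of_towels : List Int) (weekly_used_towels : List Int) : Decidable (Pre_sort_the_pile pile_of_towels weekly_used_towels) := by unfold Pre_sort_the_pile; infer_instance

def pvWitness_sort_the_pile : List Int × List Int := ([3, 1, 2, 5, 4], [2, 0, 3])

def Spec_sort_the_pile (pile_of_towels : List Int) (weekly_used_towels : List Int) (out : List Int) : Prop := out = sort_the_pile_alt pile_of_towels weekly_used_towels
instance (pile_of_towels : List Int) (weekly_used_towels : List Int) (out : List Int) : Decidable (Spec_sort_the_pile pile_of_towels weekly_used_towels out) := by unfold Spec_sort_the_pile; infer_instance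

-- ===== CLAIM (what is proved, stated in full; the proofs are below) =====
def Claim_equal_sort_the_pile : Prop := ∀ (pile_of_towels : List Int) (weekly_used_towels : List Int), Dom_sort_the_pile pile_of_towels weekly_used_towels → Pre_sort_the_pile pile_of_towels weekly_used_towels → Spec_sort_the_pile pile_of_towels weekly_used_towels (sort_the_pile pile_of_towels weekly_used_towels)

-- ===== LEMMAS AND PROOFS =====

-- descending sort, as both ports use it
def sortD (xs : List Int) : List Int := PySem.List.sorted xs (fun x => x) true

-- "sort the last a elements of xs descending" (a past the length sorts the whole list)
def opC (a : Nat) (xs : List Int) : List Int :=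
  xs.take (xs.length - a) ++ sortD (xs.drop (xs.length - a))

-- running maximum of the toNat's of a weekly list
def natMax (ws : List Int) : Nat := ws.foldl (fun acc w => max acc w.toNat) 0

-- a descending-sorted list is determined by its multiset
theorem desc_unique (l₁ l₂ : List Int) (hp : l₁.Perm l₂)
    (h1 : l₁.Pairwise (fun a b => b ≤ a)) (h2 : l₂.Pairwise (fun a b => b ≤ a)) :
    l₁ = l₂ :=
  PySem.List.eq_of_perm_of_pairwise_le_of_injective (fun x => -x)
    neg_injective hp
    (h1.imp (fun h => neg_le_neg h)) (h2.imp (fun h => neg_le_neg h))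

theorem sortD_perm (xs : List Int) : (sortD xs).Perm xs := PySem.List.sorted_perm xs _ true

theorem sortD_congr_perm (xs ys : List Int) (h : xs.Perm ys) : sortD xs = sortD ys :=
  desc_unique _ _ ((sortD_perm xs).trans (h.trans (sortD_perm ys).symm))
    (PySem.List.sorted_pairwise_rev xs _) (PySem.List.sorted_pairwise_rev ys _)

theorem sortD_eq_self (xs : List Int) (h : xs.Pairwise (fun a b => b ≤ a)) : sortD xs = xs :=
  desc_unique _ _ (sortD_perm xs) (PySem.List.sorted_pairwise_rev xs _) h

theorem length_opC (a : Nat) (xs : List Int) : (opC a xs).length = xs.length := by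
  simp [opC, sortD, PySem.List.length_sorted]

theorem sortD_nil : sortD [] = [] := rfl

theorem opC_zero (xs : List Int) : opC 0 xs = xs := by
  simp [opC, sortD_nil]

theorem opC_perm (a : Nat) (xs : List Int) : (opC a xs).Perm xs := by
  unfold opC
  calc (xs.take (xs.length - a) ++ sortD (xs.drop (xs.length - a))).Perm
        (xs.take (xs.length - a) ++ xs.drop (xs.length - a)) :=
          List.Perm.append_left _ (sortD_perm _)
    _ = xs := List.take_append_drop _ xs

theorem opC_opC (k k' : Nat) (xs : List Int) : opC k' (opC k xs) = opC (max k k') xs := by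
  have hlen : (opC k xs).length = xs.length := length_opC k xs
  have hA : (xs.take (xs.length - k)).length = xs.length - k := by
    simp [List.length_take]
  rcases le_total k' k with hle | hle
  · -- the later, smaller sort is a no-op on an already-descending suffix
    rw [Nat.max_eq_left hle]
    unfold opC at hlen ⊢
    rw [hlen]
    have hdrop : (xs.take (xs.length - k) ++ sortD (xs.drop (xs.length - k))).drop
        (xs.length - k') = (sortD (xs.drop (xs.length - k))).drop ((xs.length - k') - (xs.length - k)) := by
      rw [List.drop_append, hA, List.drop_eq_nil_of_le, List.nil_append]
      rw [hA]; omega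
    have hp : (sortD (xs.drop (xs.length - k))).Pairwise (fun a b => b ≤ a) :=
      PySem.List.sorted_pairwise_rev _ _
    rw [hdrop, sortD_eq_self _ hp.drop, ← hdrop, List.take_append_drop]
  · -- the later, larger sort subsumes the earlier one
    rw [Nat.max_eq_right hle]
    unfold opC at hlen ⊢
    rw [hlen]
    have htake : (xs.take (xs.length - k) ++ sortD (xs.drop (xs.length - k))).take
        (xs.length - k') = xs.take (xs.length - k') := by
      rw [List.take_append_of_le_length (by rw [hA]; omega), List.take_take,
        Nat.min_eq_left (by omega)]
    have hperm : ((xs.take (xs.length - k) ++ sortD (xs.drop (xs.length - k))).drop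
        (xs.length - k')).Perm (xs.drop (xs.length - k')) := by
      apply (List.perm_append_left_iff (xs.take (xs.length - k'))).mp
      rw [List.take_append_drop, ← htake, List.take_append_drop]
      have h1 := opC_perm k xs
      unfold opC at h1
      exact h1
    rw [htake, sortD_congr_perm _ _ hperm]

-- A's loop body (for w > 0) is opC w.toNat
theorem stepA (pile : List Int) (w : Int) (hw : 0 < w) :
    PySem.List.slice pile none (some (-w)) ++
      PySem.List.sorted (PySem.List.slice pile.reverse none (some w)) (fun x => x) true =
      opC w.toNat pile := by
  show PySem.List.slice pile none (some (-w)) ++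
      sortD (PySem.List.slice pile.reverse none (some w)) = opC w.toNat pile
  have hcast : -w = -(w.toNat : Int) := by omega
  rw [hcast, PySem.List.slice_to_neg_natCast pile w.toNat (by omega),
    PySem.List.slice_to _ (le_of_lt hw)]
  rw [List.take_reverse, sortD_congr_perm _ _ ((List.reverse_perm _))]
  rfl

theorem natMax_aux (l : List Int) (a : Nat) :
    l.foldl (fun acc w => max acc w.toNat) a = max a (natMax l) := by
  induction l generalizing a with
  | nil => simp [natMax]
  | cons x t ih =>
    simp only [natMax, List.foldl_cons] at *
    rw [ih (max a x.toNat), ih (max 0 x.toNat)]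
    omega

theorem natMax_cons (w : Int) (t : List Int) : natMax (w :: t) = max w.toNat (natMax t) := by
  rw [show natMax (w :: t) =
      t.foldl (fun acc v => max acc v.toNat) (max 0 w.toNat) from rfl, natMax_aux]
  omega

theorem foldA (weekly pile : List Int) (hw : ∀ w ∈ weekly, 0 ≤ w) :
    sort_the_pile pile weekly = opC (natMax weekly) pile := by
  induction weekly generalizing pile with
  | nil => simp [sort_the_pile, natMax, opC_zero]
  | cons w rest ih =>
    have hw0 : 0 ≤ w := hw w (by simp)
    have hrest : ∀ v ∈ rest, 0 ≤ v := fun v hv => hw v (by simp [hv])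
    rw [natMax_cons]
    by_cases h0 : w = 0
    · subst h0
      simp only [sort_the_pile, Int.toNat_zero, Nat.zero_max]
      exact ih pile hrest
    · have hpos : 0 < w := by omega
      simp only [sort_the_pile, if_neg h0]
      rw [ih _ hrest, stepA pile w hpos, opC_opC]

theorem toNat_foldl_max (t : List Int) (a : Int) (ha : 0 ≤ a) :
    (t.foldl max a).toNat = t.foldl (fun acc w => max acc w.toNat) a.toNat := by
  induction t generalizing a with
  | nil => simp
  | cons y ys ih =>
    simp only [List.foldl_cons]
    rw [ih (max a y) (by omega)]
    congr 1
    omega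

theorem natMax_zero_of (l : List Int) (h : ∀ w ∈ l, w.toNat = 0) : natMax l = 0 := by
  induction l with
  | nil => rfl
  | cons x t ih =>
    rw [natMax_cons, h x (by simp), ih (fun w hw => h w (by simp [hw]))]
    omega

theorem foldB (weekly pile : List Int) (hw : ∀ w ∈ weekly, 0 ≤ w) :
    sort_the_pile_alt pile weekly = opC (natMax weekly) pile := by
  unfold sort_the_pile_alt
  match weekly with
  | [] =>
    simp [PySem.List.max?, natMax, opC_zero]
  | x :: t =>
    rw [PySem.List.max?_id_cons]
    simp only
    have hx0 : 0 ≤ x := hw x (by simp)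
    have hk0 : 0 ≤ t.foldl max x := le_trans hx0 (PySem.List.le_foldl_max t x).1
    by_cases hk : t.foldl max x ≤ 0
    · rw [if_pos hk]
      have hall : ∀ w ∈ x :: t, w.toNat = 0 := by
        intro w hmem
        have hwn : 0 ≤ w := hw w hmem
        have : w ≤ t.foldl max x := by
          rcases List.mem_cons.mp hmem with h | h
          · exact h ▸ (PySem.List.le_foldl_max t x).1
          · exact (PySem.List.le_foldl_max t x).2 w h
        omega
      rw [natMax_zero_of _ hall, opC_zero]
    · rw [if_neg hk]
      have hkpos : 0 < t.foldl max x := by omega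
      have hcut0 : (0:Int) ≤ max ((pile.length : Int) - t.foldl max x) 0 := le_max_right _ _
      rw [PySem.List.slice_to _ hcut0, PySem.List.slice_from _ hcut0]
      have hnat : natMax (x :: t) = (t.foldl max x).toNat := by
        rw [natMax_cons, toNat_foldl_max t x hx0, natMax_aux t x.toNat]
      rw [hnat]
      show pile.take _ ++ sortD _ = opC _ pile
      unfold opC
      have hc : (max ((pile.length : Int) - t.foldl max x) 0).toNat =
          pile.length - (t.foldl max x).toNat := by omega
      rw [hc]

-- ===== VERDICT (by name: the statement is the Claim_ definition above) =====
theorem sort_the_pile_spec : Claim_equal_sort_the_pile := by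
  intro pile weekly _ hpre
  unfold Spec_sort_the_pile
  rw [foldA weekly pile hpre, foldB weekly pile hpre]
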